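-- pv_equiv track=rewrite | github.com/SongJeongyeonn/Coding-test | 프로그래머스/1/135808. 과일 장수/과일 장수.py | solution
-- ===== SOURCE A (Python) =====
-- def solution(k, m, score):
--     answer = 0
--     w = len(score)//m
--     score.sort(reverse=True)
--     a = [score[i] for i in range(m*w)]
--     for j in range(len(a)):
--         if (j+1) % m == 0:
--             answer += a[j] * m
--     return answer
-- ===== SOURCE B (Python) =====
-- def solution(k, m, score):
--     # Frequency-map + rank arithmetic: the box minima are the elements of
--     # descending rank m, 2m, ..., w*m; count how many of those ranks fall in
--     # each distinct value's rank interval. (A sorts `score` in place; B does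
--     # not mutate it -- return-value equivalence only.)
--     w = len(score) // m
--     freq = {}
--     for s in score:
--         freq[s] = freq.get(s, 0) + 1
--     total = 0
--     rank = 0
--     for v in sorted(freq, reverse=True):
--         hi = min(rank + freq[v], w * m)
--         if hi > rank:
--             total += v * (hi // m - rank // m)
--         rank += freq[v]
--     return total * m
-- ===== Notes on version B (the rewrite author's own statement) =====
-- stated objective: alternative
-- what changed: B replaces A's sort-then-pick-every-mth-element pass by a frequency dictionary plus rank arithmetic: the box minima are the elements of descending rank m,2m,...,w*m, so B walks the distinct values in descending order and counts via floor division how many of those ranks land in each value's cumulative-count interval, never touching the sorted element sequence; B does not mutate `score` (A sorts it in place) -- the claim is about the return value.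
-- outside the precondition, e.g. on solution(0, -2, [1, 2, 3, 4]): A returns -8, B returns 12
import Mathlib
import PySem

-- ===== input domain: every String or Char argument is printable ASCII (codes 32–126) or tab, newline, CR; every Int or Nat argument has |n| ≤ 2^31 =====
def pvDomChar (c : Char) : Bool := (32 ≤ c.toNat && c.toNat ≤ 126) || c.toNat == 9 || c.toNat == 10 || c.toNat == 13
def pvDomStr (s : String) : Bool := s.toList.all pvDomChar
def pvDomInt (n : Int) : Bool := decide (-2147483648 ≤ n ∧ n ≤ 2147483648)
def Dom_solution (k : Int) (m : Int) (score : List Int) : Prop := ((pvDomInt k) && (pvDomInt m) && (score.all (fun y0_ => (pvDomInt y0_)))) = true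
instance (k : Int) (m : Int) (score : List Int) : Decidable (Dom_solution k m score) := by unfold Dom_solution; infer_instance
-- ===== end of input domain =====

-- B replaces A's sort-then-pick-every-mth pass by a frequency dictionary plus rank arithmetic
-- over the distinct values in descending order (objective: alternative). A sorts `score` in
-- place; B does not mutate it — the equivalence proved is about the return value only.

-- ===== PORT A =====
def solution (k : Int) (m : Int) (score : List Int) : Int :=
  let answer : Int := 0
  let w : Int := PySem.Int.floordiv (score.length : Int) m
  let s : List Int := PySem.List.sorted score (fun x => x) true
  let a : List Int := (PySem.List.pyRange 0 (m * w) 1).map (fun i => PySem.List.pyGetD s i 0)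
  (PySem.List.pyRange 0 (a.length : Int) 1).foldl
    (fun answer j =>
      if PySem.Int.mod (j + 1) m = 0 then answer + PySem.List.pyGetD a j 0 * m else answer)
    answer

-- ===== PORT B =====
def solution_alt (k : Int) (m : Int) (score : List Int) : Int :=
  let w : Int := PySem.Int.floordiv (score.length : Int) m
  let freq : PySem.Dict Int Int :=
    score.foldl (fun d s => d.insert s (d.getD s 0 + 1)) PySem.Dict.empty
  -- for v in sorted(freq, reverse=True): the state is (total, rank);
  -- freq[v]: v is a key of freq, so the lookup cannot fail (ported as getD)
  let res : Int × Int :=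
    (PySem.List.sorted (PySem.Dict.keys freq) (fun x => x) true).foldl
      (fun (tr : Int × Int) v =>
        let hi : Int := min (tr.2 + freq.getD v 0) (w * m)
        (if hi > tr.2
           then tr.1 + v * (PySem.Int.floordiv hi m - PySem.Int.floordiv tr.2 m)
           else tr.1,
         tr.2 + freq.getD v 0))
      (0, 0)
  res.1 * m

-- ===== PRECONDITION & SPEC =====
-- Pre_ restricts to the task's natural domain m ≥ 1: m = 0 makes both A and B raise
-- ZeroDivisionError, and for negative m the two programs' values are accidental artefacts
-- of floor division with a negative divisor (A raises IndexError unless |m| divides len(score)).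
def Pre_solution (k : Int) (m : Int) (score : List Int) : Prop := 1 ≤ m
instance (k : Int) (m : Int) (score : List Int) : Decidable (Pre_solution k m score) := by
  unfold Pre_solution; infer_instance
def pvWitness_solution : Int × Int × List Int := (0, 2, [1, 2, 3])
def Spec_solution (k : Int) (m : Int) (score : List Int) (out : Int) : Prop := out = solution_alt k m score
instance (k : Int) (m : Int) (score : List Int) (out : Int) : Decidable (Spec_solution k m score out) := by
  unfold Spec_solution; infer_instance

-- ===== CLAIM (what is proved, stated in full; the proofs are below) =====
def Claim_equal_solution : Prop := ∀ (k : Int) (m : Int) (score : List Int),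
  Dom_solution k m score → Pre_solution k m score → Spec_solution k m score (solution k m score)

-- ===== LEMMAS AND PROOFS =====

/-- A fold that conditionally adds equals the initial value plus a sum of ite-terms. -/
lemma pv_foldl_ite_add {β : Type} (l : List β) (c : β → Prop) [DecidablePred c]
    (g : β → Int) (a : Int) :
    l.foldl (fun acc x => if c x then acc + g x else acc) a
      = a + (l.map (fun x => if c x then g x else 0)).sum := by
  induction l generalizing a with
  | nil => simp
  | cons x t ih =>
    simp only [List.foldl_cons, List.map_cons, List.sum_cons]
    by_cases hx : c x <;> simp [hx, ih] <;> ring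

/-- Reindexing: the modulo-filtered sum over range (M*W) is the sum over the boxes' last indices. -/
lemma pv_reindex (f : Nat → Int) (M : Nat) (hM : 1 ≤ M) (W : Nat) :
    ((List.range (M * W)).map
      (fun (t : Nat) => if (M : Int) ∣ ((t : Int) + 1) then f t else 0)).sum
    = ((List.range W).map (fun t => f (M * t + (M - 1)))).sum := by
  induction W with
  | zero => simp
  | succ W ih =>
    rw [show M * (W + 1) = M * W + M by ring, List.range_add, List.map_append, List.sum_append, ih,
        List.range_succ, List.map_append, List.sum_append]
    congr 1
    rw [List.map_map]
    have hsum : ∀ r ∈ List.range M,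
        ((fun (t : Nat) => if (M : Int) ∣ ((t : Int) + 1) then f t else 0) ∘ (fun x => M * W + x)) r
        = if r = M - 1 then f (M * W + (M - 1)) else 0 := by
      intro r hr
      have hrlt : r < M := List.mem_range.mp hr
      by_cases hre : r = M - 1
      · subst hre
        have hdvd : (M : Int) ∣ ((↑(M * W + (M - 1)) : Int) + 1) := by
          rw [show ((↑(M * W + (M - 1)) : Int) + 1) = ((M * W + (M - 1) + 1 : Nat) : Int) by
            push_cast; ring, Int.natCast_dvd_natCast,
            show M * W + (M - 1) + 1 = M * (W + 1) by rw [Nat.mul_succ]; omega]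
          exact dvd_mul_right M (W + 1)
        simp only [Function.comp_apply]
        rw [if_pos hdvd]
        simp
      · have hnd : ¬ (M : Int) ∣ ((↑(M * W + r) : Int) + 1) := by
          rw [show ((↑(M * W + r) : Int) + 1) = ((M * W + r + 1 : Nat) : Int) by push_cast; ring,
            Int.natCast_dvd_natCast]
          intro hd
          have h2 : M ∣ r + 1 :=
            (Nat.dvd_add_right (dvd_mul_right M W)).mp (by rwa [Nat.add_assoc] at hd)
          have := Nat.le_of_dvd (by omega) h2
          omega
        simp only [Function.comp_apply]
        rw [if_neg hnd, if_neg hre]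
    rw [List.map_congr_left hsum]
    have : List.range M = List.range (M - 1) ++ [M - 1] := by
      conv_lhs => rw [show M = M - 1 + 1 by omega]
      rw [List.range_succ]
    rw [this, List.map_append, List.sum_append]
    have hz : ∀ x ∈ List.range (M - 1), (if x = M - 1 then f (M * W + (M - 1)) else 0) = 0 := by
      intro x hx
      have := List.mem_range.mp hx
      simp [show x ≠ M - 1 by omega]
    rw [List.sum_eq_zero (by intro y hy; rcases List.mem_map.mp hy with ⟨x, hx, rfl⟩; exact hz x hx)]
    simp

/-- Pulling a constant factor out of a mapped sum. -/
lemma pv_sum_mul {α : Type} (l : List α) (g : α → Int) (c : Int) :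
    (l.map (fun x => g x * c)).sum = (l.map g).sum * c :=
  List.sum_map_mul_right l g c

/-- The comprehension `[s[i] for i in range(N)]` is `s.take N` when `N ≤ len s`. -/
lemma pv_take_eval (s : List Int) (N : Nat) (hN : N ≤ s.length) :
    (PySem.List.pyRange 0 ((N : Nat) : Int) 1).map (fun i => PySem.List.pyGetD s i 0)
      = s.take N := by
  apply List.ext_getElem
  · simp [PySem.List.length_pyRange_one, List.length_take]
    omega
  · intro i h1 h2
    have hiN : i < N := by
      simpa [PySem.List.length_pyRange_one] using h1
    have hil : i < s.length := lt_of_lt_of_le hiN hN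
    rw [List.getElem_map, PySem.List.getElem_pyRange_one, List.getElem_take]
    rw [show (0 : Int) + (i : Int) = ((i : Nat) : Int) by omega, PySem.List.pyGetD_natCast,
      List.getD_eq_getElem?_getD, List.getElem?_eq_getElem hil]
    rfl

/-- getD on a take, inside the taken prefix. -/
lemma pv_getD_take (s : List Int) (N k : Nat) (hk : k < N) :
    (s.take N).getD k 0 = s.getD k 0 := by
  rw [List.getD_eq_getElem?_getD, List.getD_eq_getElem?_getD, List.getElem?_take_of_lt hk]

/-- A's filtered index loop evaluates to the sum of box-last elements times m. -/
lemma pv_A_eval (s : List Int) (M W : Nat) (hM : 1 ≤ M) (hW : M * W ≤ s.length) :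
    ((PySem.List.pyRange 0 (((s.take (M * W)).length : Nat) : Int) 1).foldl
      (fun answer j =>
        if PySem.Int.mod (j + 1) ((M : Nat) : Int) = 0
        then answer + PySem.List.pyGetD (s.take (M * W)) j 0 * ((M : Nat) : Int) else answer) 0)
    = ((List.range W).map (fun t => s.getD (M * t + (M - 1)) 0)).sum * ((M : Nat) : Int) := by
  have hlen : (s.take (M * W)).length = M * W := by
    simp [List.length_take]; omega
  rw [hlen,
    pv_foldl_ite_add (PySem.List.pyRange 0 ((M * W : Nat) : Int) 1)
      (fun j => PySem.Int.mod (j + 1) ((M : Nat) : Int) = 0)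
      (fun j => PySem.List.pyGetD (s.take (M * W)) j 0 * ((M : Nat) : Int)) 0,
    zero_add, PySem.List.pyRange_one, List.map_map]
  rw [show ((( M * W : Nat) : Int) - 0).toNat = M * W by omega]
  have hterm : ∀ k ∈ List.range (M * W),
      ((fun j => if PySem.Int.mod (j + 1) ((M : Nat) : Int) = 0
          then PySem.List.pyGetD (s.take (M * W)) j 0 * ((M : Nat) : Int) else 0)
        ∘ (fun k : Nat => (0 : Int) + (k : Int))) k
      = (fun (t : Nat) => if ((M : Nat) : Int) ∣ ((t : Int) + 1)
          then s.getD t 0 * ((M : Nat) : Int) else 0) k := by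
    intro k hk
    have hkN : k < M * W := List.mem_range.mp hk
    simp only [Function.comp_apply, zero_add, PySem.Int.mod_eq_zero_iff_dvd,
      PySem.List.pyGetD_natCast, pv_getD_take s (M * W) k hkN]
  rw [List.map_congr_left hterm, pv_reindex (fun t => s.getD t 0 * ((M : Nat) : Int)) M hM W,
    pv_sum_mul]

/-- A sum of pointwise sums splits. -/
lemma pv_sum_map_add {α : Type} (l : List α) (f g : α → Int) :
    (l.map (fun x => f x + g x)).sum = (l.map f).sum + (l.map g).sum := by
  induction l with
  | nil => simp
  | cons x t ih => simp only [List.map_cons, List.sum_cons, ih]; ring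

/-- Sum of a constant over the satisfying elements is the constant times the count. -/
lemma pv_sum_ite_const {α : Type} (l : List α) (P : α → Prop) [DecidablePred P] (v : Int) :
    (l.map (fun x => if P x then v else 0)).sum
      = v * ((l.countP (fun x => decide (P x)) : Nat) : Int) := by
  induction l with
  | nil => simp
  | cons x t ih =>
    by_cases hx : P x <;> simp [List.countP_cons, hx, ih] <;> push_cast <;> ring

/-- Counting the elements of range W in a half-open window. -/
lemma pv_countP_window (W a b : Nat) :
    (List.range W).countP (fun t => decide (a ≤ t) && decide (t < b)) = min b W - a := by
  induction W with
  | zero => simp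
  | succ W ih =>
    rw [List.range_succ, List.countP_append, ih]
    by_cases h : a ≤ W ∧ W < b <;>
      simp only [List.countP_cons, List.countP_nil, Bool.and_eq_true, decide_eq_true_eq] <;>
      · simp only [h, and_true, and_false, if_pos, if_neg, not_false_iff]
        omega

/-- Nat division distributes over min. -/
lemma pv_min_div (a b M : Nat) : min a b / M = min (a / M) (b / M) := by
  rcases le_total a b with h | h
  · rw [min_eq_left h, min_eq_left (Nat.div_le_div_right h)]
  · rw [min_eq_right h, min_eq_right (Nat.div_le_div_right h)]

/-- Elements inside the first block of `s.drop p` all equal the block's value. -/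
lemma pv_getD_block (s : List Int) (p c : Nat) (v : Int) (rest : List Int)
    (hdrop : s.drop p = List.replicate c v ++ rest) :
    ∀ j, p ≤ j → j < p + c → s.getD j 0 = v := by
  intro j hpj hjc
  have hjp : j - p < c := by omega
  have hlen : s.length - p = c + rest.length := by
    have := congrArg List.length hdrop
    simpa using this
  have hjlt : j < s.length := by omega
  have h1 : s[j]? = (s.drop p)[j - p]? := by
    rw [List.getElem?_drop, show p + (j - p) = j by omega]
  have h2 : (List.replicate c v ++ rest)[j - p]? = some v := by
    rw [List.getElem?_append_left (by simpa using hjp)]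
    simp [List.getElem?_replicate, hjp]
  rw [List.getD_eq_getElem?_getD, h1, hdrop, h2]
  rfl

/-- B's key loop over a block decomposition of the (conceptually) sorted list computes
    the window sums of box-last elements; induction over the distinct values. -/
lemma pv_blocks (M W : Nat) (hM : 1 ≤ M) (s : List Int) (hW : M * W ≤ s.length)
    (cnt : Int → Nat) :
    ∀ (ks : List Int) (p : Nat) (T : Int),
      s.drop p = (ks.map (fun v => List.replicate (cnt v) v)).flatten →
      (ks.foldl
        (fun (tr : Int × Int) v =>
          let hi : Int := min (tr.2 + ((cnt v : Nat) : Int)) (((W : Nat) : Int) * ((M : Nat) : Int))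
          (if hi > tr.2
             then tr.1 + v * (PySem.Int.floordiv hi ((M : Nat) : Int)
                              - PySem.Int.floordiv tr.2 ((M : Nat) : Int))
             else tr.1,
           tr.2 + ((cnt v : Nat) : Int)))
        (T, ((p : Nat) : Int))).1
      = T + ((List.range W).map
          (fun t => if p ≤ M * t + (M - 1) then s.getD (M * t + (M - 1)) 0 else 0)).sum := by
  intro ks
  induction ks with
  | nil =>
    intro p T hdrop
    have hp : s.length ≤ p := by
      have := List.drop_eq_nil_iff.mp (by simpa using hdrop)
      omega
    rw [List.foldl_nil]
    have hz : ∀ t ∈ List.range W,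
        (if p ≤ M * t + (M - 1) then s.getD (M * t + (M - 1)) 0 else 0) = 0 := by
      intro t ht
      have htW : t < W := List.mem_range.mp ht
      have : M * t + (M - 1) < M * W := by
        have : M * (t + 1) ≤ M * W := Nat.mul_le_mul_left M htW
        have h2 : M * (t + 1) = M * t + M := by ring
        omega
      rw [if_neg (by omega)]
    rw [List.sum_eq_zero (by intro y hy; rcases List.mem_map.mp hy with ⟨x, hx, rfl⟩; exact hz x hx)]
    simp
  | cons v ks ih =>
    intro p T hdrop
    simp only [List.map_cons, List.flatten_cons] at hdrop
    have hlen : s.length - p = cnt v + ((ks.map (fun v => List.replicate (cnt v) v)).flatten).length := by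
      have := congrArg List.length hdrop
      simpa using this
    have hdrop' : s.drop (p + cnt v) = (ks.map (fun v => List.replicate (cnt v) v)).flatten := by
      have hdd : (s.drop p).drop (cnt v) = s.drop (p + cnt v) := by
        rw [List.drop_drop, Nat.add_comm]
      rw [← hdd, hdrop]
      simp
    rw [List.foldl_cons]
    have hcast : ((p : Nat) : Int) + ((cnt v : Nat) : Int) = (((p + cnt v : Nat)) : Int) := by
      push_cast; ring
    -- the per-term split of the window sum
    have hsplit : ∀ t ∈ List.range W,
        (if p ≤ M * t + (M - 1) then s.getD (M * t + (M - 1)) 0 else 0)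
        = (if p ≤ M * t + (M - 1) ∧ M * t + (M - 1) < p + cnt v then v else 0)
          + (if p + cnt v ≤ M * t + (M - 1) then s.getD (M * t + (M - 1)) 0 else 0) := by
      intro t ht
      set j := M * t + (M - 1) with hj
      by_cases h1 : p ≤ j
      · by_cases h2 : j < p + cnt v
        · rw [if_pos h1, if_pos ⟨h1, h2⟩, if_neg (by omega),
            pv_getD_block s p (cnt v) v _ hdrop j h1 h2]
          ring
        · rw [if_pos h1, if_neg (by tauto), if_pos (by omega)]
          ring
      · rw [if_neg h1, if_neg (by tauto), if_neg (by omega)]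
        ring
    rw [List.map_congr_left hsplit, pv_sum_map_add]
    -- the contribution of value v matches B's floor-division step
    have hhalf :
        (if min (((p : Nat) : Int) + ((cnt v : Nat) : Int)) (((W : Nat) : Int) * ((M : Nat) : Int))
             > ((p : Nat) : Int)
           then T + v * (PySem.Int.floordiv
                  (min (((p : Nat) : Int) + ((cnt v : Nat) : Int)) (((W : Nat) : Int) * ((M : Nat) : Int)))
                  ((M : Nat) : Int)
                - PySem.Int.floordiv ((p : Nat) : Int) ((M : Nat) : Int))
           else T)
        = T + ((List.range W).map
            (fun t => if p ≤ M * t + (M - 1) ∧ M * t + (M - 1) < p + cnt v then v else 0)).sum := by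
      have hcond : ∀ t : Nat, (p ≤ M * t + (M - 1) ∧ M * t + (M - 1) < p + cnt v)
          ↔ (p / M ≤ t ∧ t < (p + cnt v) / M) := by
        intro t
        have hprod : (t + 1) * M = M * t + M := by ring
        have hd1 : p / M < t + 1 ↔ p < (t + 1) * M := Nat.div_lt_iff_lt_mul (by omega)
        have hd2 : t + 1 ≤ (p + cnt v) / M ↔ (t + 1) * M ≤ p + cnt v :=
          Nat.le_div_iff_mul_le (by omega)
        have h1 : (p ≤ M * t + (M - 1)) ↔ p / M ≤ t := by
          rw [show (p ≤ M * t + (M - 1)) ↔ (p < (t + 1) * M) from by rw [hprod]; omega, ← hd1]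
          exact Nat.lt_succ_iff
        have h2 : (M * t + (M - 1) < p + cnt v) ↔ t < (p + cnt v) / M := by
          rw [show (M * t + (M - 1) < p + cnt v) ↔ ((t + 1) * M ≤ p + cnt v) from by
                rw [hprod]; omega,
              ← hd2]
          exact Nat.add_one_le_iff
        rw [h1, h2]
      have hsum : ((List.range W).map
            (fun t => if p ≤ M * t + (M - 1) ∧ M * t + (M - 1) < p + cnt v then v else 0)).sum
          = v * ((min ((p + cnt v) / M) W - p / M : Nat) : Int) := by
        rw [pv_sum_ite_const (List.range W)
            (fun t => p ≤ M * t + (M - 1) ∧ M * t + (M - 1) < p + cnt v) v]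
        congr 2
        have : (fun t => decide (p ≤ M * t + (M - 1) ∧ M * t + (M - 1) < p + cnt v))
            = (fun t => decide (p / M ≤ t) && decide (t < (p + cnt v) / M)) := by
          funext t
          rw [← Bool.decide_and]
          exact decide_eq_decide.mpr (hcond t)
        rw [this, pv_countP_window W (p / M) ((p + cnt v) / M)]
      rw [hsum]
      -- convert B's Int arithmetic to the Nat count
      have hmin : min (((p : Nat) : Int) + ((cnt v : Nat) : Int)) (((W : Nat) : Int) * ((M : Nat) : Int))
          = ((min (p + cnt v) (W * M) : Nat) : Int) := by
        push_cast
        ring_nf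
      have hdivmin : min (p + cnt v) (W * M) / M = min ((p + cnt v) / M) W := by
        rw [pv_min_div, Nat.mul_div_cancel W (by omega : 0 < M)]
      by_cases hg : (p : Int) < ((min (p + cnt v) (W * M) : Nat) : Int)
      · have hpn : p < min (p + cnt v) (W * M) := by exact_mod_cast hg
        have hdle : p / M ≤ min (p + cnt v) (W * M) / M := Nat.div_le_div_right (by omega)
        rw [if_pos (by rw [hmin]; exact_mod_cast hg), hmin]
        have hf1 : PySem.Int.floordiv ((min (p + cnt v) (W * M) : Nat) : Int) ((M : Nat) : Int)
            = ((min (p + cnt v) (W * M) / M : Nat) : Int) := PySem.Int.floordiv_natCast _ _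
        have hf2 : PySem.Int.floordiv ((p : Nat) : Int) ((M : Nat) : Int)
            = ((p / M : Nat) : Int) := PySem.Int.floordiv_natCast _ _
        have hdle' : p / M ≤ min ((p + cnt v) / M) W := by
          rw [← hdivmin]
          exact Nat.div_le_div_right (le_of_lt hpn)
        rw [hf1, hf2, hdivmin, ← Nat.cast_sub hdle']
      · have hpn : min (p + cnt v) (W * M) ≤ p := by
          by_contra hc
          exact hg (by exact_mod_cast (by omega : (p : Nat) < min (p + cnt v) (W * M)))
        have hdle : min ((p + cnt v) / M) W ≤ p / M := by
          rw [← hdivmin]; exact Nat.div_le_div_right hpn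
        rw [if_neg (by rw [hmin]; exact_mod_cast hg)]
        rw [show min ((p + cnt v) / M) W - p / M = 0 by omega]
        simp
    -- assemble via the induction hypothesis
    have := ih (p + cnt v)
      (if min (((p : Nat) : Int) + ((cnt v : Nat) : Int)) (((W : Nat) : Int) * ((M : Nat) : Int))
           > ((p : Nat) : Int)
         then T + v * (PySem.Int.floordiv
                (min (((p : Nat) : Int) + ((cnt v : Nat) : Int)) (((W : Nat) : Int) * ((M : Nat) : Int)))
                ((M : Nat) : Int)
              - PySem.Int.floordiv ((p : Nat) : Int) ((M : Nat) : Int))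
         else T)
      hdrop'
    simp only [hcast] at *
    rw [this, hhalf]
    ring

/-- Counting inside a flatten of constant blocks over distinct values. -/
lemma pv_count_flatten_blocks (ks : List Int) (hnd : ks.Nodup) (cnt : Int → Nat) (a : Int) :
    ((ks.map (fun v => List.replicate (cnt v) v)).flatten).count a
      = if a ∈ ks then cnt a else 0 := by
  induction ks with
  | nil => simp
  | cons v t ih =>
    have hnd' := hnd.of_cons
    simp only [List.map_cons, List.flatten_cons, List.count_append, ih hnd',
      List.count_replicate]
    by_cases hv : a = v
    · subst hv
      have hna : a ∉ t := (List.nodup_cons.mp hnd).1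
      simp [hna]
    · simp [hv, Ne.symm, List.mem_cons]

/-- The descending sort equals the concatenation of constant blocks over the
    descending distinct values. -/
lemma pv_sorted_eq_flatten (score : List Int) :
    PySem.List.sorted score (fun x => x) true
      = ((PySem.List.sorted (PySem.Set.ofList score) (fun x => x) true).map
          (fun v => List.replicate (score.count v) v)).flatten := by
  set ksd := PySem.List.sorted (PySem.Set.ofList score) (fun x => x) true with hksd
  have hknd : ksd.Nodup :=
    ((PySem.List.sorted_perm (PySem.Set.ofList score) (fun x => x) true).symm).nodup
      (PySem.Set.nodup_ofList score)
  have hkmem : ∀ a : Int, a ∈ ksd ↔ a ∈ score := by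
    intro a
    rw [hksd, PySem.List.mem_sorted, PySem.Set.mem_ofList]
  have hkp : ksd.Pairwise (fun a b : Int => b ≤ a) := by
    have := PySem.List.sorted_pairwise_rev (PySem.Set.ofList score) (fun x : Int => x)
    simpa [hksd] using this
  -- the flatten is a permutation of score (count argument)
  have hperm : (ksd.map (fun v => List.replicate (score.count v) v)).flatten.Perm score := by
    rw [List.perm_iff_count]
    intro a
    rw [pv_count_flatten_blocks ksd hknd (fun v => score.count v) a]
    by_cases ha : a ∈ ksd
    · simp [ha]
    · rw [if_neg ha, Eq.comm, List.count_eq_zero]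
      intro hc
      exact ha ((hkmem a).mpr hc)
  -- the flatten is non-increasing
  have hpair : ((ksd.map (fun v => List.replicate (score.count v) v)).flatten).Pairwise
      (fun a b : Int => b ≤ a) := by
    rw [List.pairwise_flatten]
    refine ⟨?_, ?_⟩
    · intro l hl
      rcases List.mem_map.mp hl with ⟨v, _, rfl⟩
      exact List.pairwise_replicate.mpr (Or.inr le_rfl)
    · rw [List.pairwise_map]
      refine hkp.imp_of_mem ?_
      intro a b _ _ hab
      intro x hx y hy
      rw [List.eq_of_mem_replicate hx, List.eq_of_mem_replicate hy]
      exact hab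
  -- two non-increasing permutations of score coincide
  have hsp : (PySem.List.sorted score (fun x => x) true).Pairwise (fun a b : Int => b ≤ a) := by
    have := PySem.List.sorted_pairwise_rev score (fun x : Int => x)
    simpa using this
  have hperm2 : (PySem.List.sorted score (fun x => x) true).Perm
      ((ksd.map (fun v => List.replicate (score.count v) v)).flatten) :=
    (PySem.List.sorted_perm score (fun x => x) true).trans hperm.symm
  exact List.Perm.eq_of_sortedGE (List.sortedGE_iff_pairwise.mpr hsp)
    (List.sortedGE_iff_pairwise.mpr hpair) hperm2

-- ===== VERDICT (by name: the statement is the Claim_ definition above) =====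
theorem solution_spec : Claim_equal_solution := by
  intro k m score _ hm
  unfold Pre_solution at hm
  unfold Spec_solution
  obtain ⟨M, rfl⟩ : ∃ M : Nat, m = ((M : Nat) : Int) :=
    ⟨m.toNat, (Int.toNat_of_nonneg (by omega)).symm⟩
  have hM : 1 ≤ M := by exact_mod_cast hm
  unfold solution solution_alt
  simp only []
  have hfloor : PySem.Int.floordiv ((score.length : Nat) : Int) ((M : Nat) : Int)
      = ((score.length / M : Nat) : Int) := PySem.Int.floordiv_natCast _ _
  set W : Nat := score.length / M with hWdef
  set s : List Int := PySem.List.sorted score (fun x => x) true with hs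
  have hW : M * W ≤ s.length := by
    rw [hs, PySem.List.length_sorted]
    calc M * W = W * M := by ring
    _ ≤ score.length := Nat.div_mul_le_self _ _
  -- A's side
  have hcast : ((M : Nat) : Int) * ((score.length / M : Nat) : Int)
      = ((M * W : Nat) : Int) := by rw [← hWdef]; push_cast; ring
  rw [hfloor, hcast,
    pv_take_eval s (M * W) hW,
    pv_A_eval s M W hM hW]
  -- B's side
  rw [PySem.Dict.foldl_insert_getD_add_one_eq_counter]
  simp only [PySem.Dict.getD_counter, PySem.Dict.keys_counter]
  have hblocks : s.drop 0
      = ((PySem.List.sorted (PySem.Set.ofList score) (fun x => x) true).map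
          (fun v => List.replicate (score.count v) v)).flatten := by
    rw [List.drop_zero, hs, pv_sorted_eq_flatten]
  have hmain := pv_blocks M W hM s hW (fun v => score.count v)
    (PySem.List.sorted (PySem.Set.ofList score) (fun x => x) true) 0 0 hblocks
  have hWM : ((score.length / M : Nat) : Int) * ((M : Nat) : Int)
      = ((W : Nat) : Int) * ((M : Nat) : Int) := by rw [← hWdef]
  rw [hWM]
  simp only [Nat.cast_zero] at hmain
  rw [hmain, zero_add]
  have hz : ∀ t ∈ List.range W,
      (if 0 ≤ M * t + (M - 1) then s.getD (M * t + (M - 1)) 0 else 0)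
        = s.getD (M * t + (M - 1)) 0 := fun t _ => if_pos (Nat.zero_le _)
  rw [List.map_congr_left hz]
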